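-- pv_equiv track=rewrite | github.com/DeanHe/Practice | LeetCodePython/CountBowlSubarrays.py | bowlSubarrays
-- ===== SOURCE A (Python) =====
-- from typing import List
--
-- def bowlSubarrays(nums: List[int]) -> int:
--     res = 0
--     sz = len(nums)
--     left_greater_idx = [-1] * sz
--     right_greater_idx = [-1] * sz
--     st = []
--     for i in range(sz):
--         while st and nums[st[-1]] < nums[i]:
--             right_greater_idx[st[-1]] = i
--             st.pop()
--         st.append(i)
--     st.clear()
--     for i in range(sz - 1, -1, -1):
--         while st and nums[st[-1]] < nums[i]:
--             left_greater_idx[st[-1]] = i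
--             st.pop()
--         st.append(i)
--     for i in range(sz):
--         if left_greater_idx[i] != -1 and right_greater_idx[i] != -1:
--             res += 1
--     return res
-- ===== SOURCE B (Python) =====
-- from typing import List
--
-- def bowlSubarrays(nums: List[int]) -> int:
--     n = len(nums)
--     has_left = []
--     m = None
--     for v in nums:
--         has_left.append(m is not None and m > v)
--         if m is None or v > m:
--             m = v
--     res = 0
--     m = None
--     for i in range(n - 1, -1, -1):
--         v = nums[i]
--         if m is not None and m > v and has_left[i]:
--             res += 1
--         if m is None or v > m:
--             m = v
--     return res
-- ===== Notes on version B (the rewrite author's own statement) =====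
-- stated objective: simpler
-- what changed: Replaces the two monotonic-stack nearest-greater-index passes and the two index arrays with two running-maximum scans (prefix max and suffix max), since only the existence of a strictly greater neighbor on each side matters.
import Mathlib
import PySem

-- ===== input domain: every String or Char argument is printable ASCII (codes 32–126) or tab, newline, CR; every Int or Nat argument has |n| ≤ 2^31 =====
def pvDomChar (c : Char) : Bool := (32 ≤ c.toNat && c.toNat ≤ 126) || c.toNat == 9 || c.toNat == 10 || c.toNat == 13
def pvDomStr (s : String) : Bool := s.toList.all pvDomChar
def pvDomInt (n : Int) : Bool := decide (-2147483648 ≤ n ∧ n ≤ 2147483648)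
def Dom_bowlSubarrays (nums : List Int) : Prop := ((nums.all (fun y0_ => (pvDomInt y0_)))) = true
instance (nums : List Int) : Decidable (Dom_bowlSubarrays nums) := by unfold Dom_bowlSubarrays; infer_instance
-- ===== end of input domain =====

-- B replaces A's two monotonic-stack nearest-greater-index passes with two running-maximum
-- scans (only the existence of a strictly greater neighbour on each side matters): simpler.

-- ===== PORT A =====
def popLoop (nums : List Int) (v : Int) (i : Nat) : List Nat → List Int → List Nat × List Int
  | [], r => ([], r)
  | t :: rest, r =>
    if nums.getD t 0 < v then popLoop nums v i rest (r.set t (Int.ofNat i))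
    else (t :: rest, r)

def stackPass (nums : List Int) (order : List Nat) : List Int :=
  (order.foldl (fun s i =>
      let p := popLoop nums (nums.getD i 0) i s.1 s.2
      (i :: p.1, p.2)) (([] : List Nat), List.replicate nums.length (-1 : Int))).2

def bowlSubarrays (nums : List Int) : Int :=
  let sz := nums.length
  let rightG := stackPass nums (List.range sz)
  let leftG := stackPass nums (List.range sz).reverse
  (List.range sz).foldl (fun res i =>
      if leftG.getD i (-1) ≠ -1 ∧ rightG.getD i (-1) ≠ -1 then res + 1 else res) 0

-- ===== PORT B =====
def gtb (m : Option Int) (v : Int) : Bool :=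
  match m with | none => false | some x => decide (v < x)

def bump (m : Option Int) (v : Int) : Option Int :=
  match m with | none => some v | some x => if v > x then some v else some x

def bowlSubarrays_alt (nums : List Int) : Int :=
  let n := nums.length
  let fwd := nums.foldl (fun (s : List Bool × Option Int) v =>
      (s.1 ++ [gtb s.2 v], bump s.2 v)) (([] : List Bool), (none : Option Int))
  let hasLeft := fwd.1
  let bwd := ((List.range n).reverse).foldl (fun (s : Int × Option Int) i =>
      (if gtb s.2 (nums.getD i 0) && hasLeft.getD i false then s.1 + 1 else s.1,
       bump s.2 (nums.getD i 0))) ((0 : Int), (none : Option Int))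
  bwd.1

-- ===== PRECONDITION & SPEC =====
def Spec_bowlSubarrays (nums : List Int) (out : Int) : Prop := out = bowlSubarrays_alt nums
instance (nums : List Int) (out : Int) : Decidable (Spec_bowlSubarrays nums out) := by unfold Spec_bowlSubarrays; infer_instance

-- ===== CLAIM (what is proved, stated in full; the proofs are below) =====
def Claim_equal_bowlSubarrays : Prop := ∀ (nums : List Int), Dom_bowlSubarrays nums → Spec_bowlSubarrays nums (bowlSubarrays nums)

-- ===== LEMMAS AND PROOFS =====
def hasLb (nums : List Int) (j : Nat) : Bool :=
  (List.range j).any fun m => decide (nums.getD j 0 < nums.getD m 0)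
def hasRb (nums : List Int) (j : Nat) : Bool :=
  (List.range nums.length).any fun m => decide (j < m) && decide (nums.getD j 0 < nums.getD m 0)
def keyCount (nums : List Int) : Nat :=
  (List.range nums.length).countP fun j => hasLb nums j && hasRb nums j

def StInv (lt : Nat → Nat → Prop) (nums : List Int) (done st : List Nat) (r : List Int) : Prop :=
  (∀ j ∈ done, j < nums.length) ∧
  (∀ j ∈ st, j ∈ done) ∧
  List.Pairwise (fun a b => lt b a) st ∧
  List.Pairwise (fun a b => nums.getD a 0 ≤ nums.getD b 0) st ∧
  (∀ j ∈ done, (j ∈ st ↔ ∀ m ∈ done, lt j m → ¬ (nums.getD j 0 < nums.getD m 0))) ∧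
  r.length = nums.length ∧
  (∀ j : Nat, r.getD j (-1) ≠ -1 ↔ (j ∈ done ∧ ∃ m ∈ done, lt j m ∧ nums.getD j 0 < nums.getD m 0))

theorem getD_set_self (l : List Int) (t : Nat) (x d : Int) (h : t < l.length) :
    (l.set t x).getD t d = x := by
  simp [List.getD_eq_getElem?_getD, List.getElem?_set_self h]

theorem getD_set_ne (l : List Int) (t j : Nat) (x d : Int) (h : t ≠ j) :
    (l.set t x).getD j d = l.getD j d := by
  simp [List.getD_eq_getElem?_getD, List.getElem?_set_ne h]

theorem popLoop_spec (nums : List Int) (v : Int) (i : Nat) :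
    ∀ (st : List Nat) (r : List Int),
    List.Pairwise (fun a b => nums.getD a 0 ≤ nums.getD b 0) st →
    (∀ t ∈ st, t < r.length) →
    ∃ P : List Nat,
      st = P ++ (popLoop nums v i st r).1 ∧
      (∀ t ∈ P, nums.getD t 0 < v) ∧
      (∀ t ∈ (popLoop nums v i st r).1, v ≤ nums.getD t 0) ∧
      (popLoop nums v i st r).2.length = r.length ∧
      (∀ j : Nat, (popLoop nums v i st r).2.getD j (-1) =
          if j ∈ P then Int.ofNat i else r.getD j (-1)) := by
  intro st
  induction st with
  | nil =>
    intro r _ _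
    exact ⟨[], by simp [popLoop], by simp, by simp [popLoop], by simp [popLoop], by simp [popLoop]⟩
  | cons t rest ih =>
    intro r hpw hlen
    by_cases h : nums.getD t 0 < v
    · have hre : popLoop nums v i (t :: rest) r = popLoop nums v i rest (r.set t (Int.ofNat i)) := by
        show (if nums.getD t 0 < v then popLoop nums v i rest (r.set t (Int.ofNat i)) else (t :: rest, r)) = _
        rw [if_pos h]
      have hlen' : ∀ u ∈ rest, u < (r.set t (Int.ofNat i)).length := by
        simpa using fun u hu => hlen u (List.mem_cons_of_mem _ hu)
      obtain ⟨P, h1, h2, h3, h4, h5⟩ := ih (r.set t (Int.ofNat i)) hpw.of_cons hlen'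
      refine ⟨t :: P, ?_, ?_, ?_, ?_, ?_⟩
      · rw [hre]; simpa using h1
      · intro u hu
        rcases List.mem_cons.mp hu with rfl | hu
        · exact h
        · exact h2 u hu
      · rw [hre]; exact h3
      · rw [hre]; simpa using h4
      · intro j
        rw [hre, h5 j]
        by_cases hjt : j = t
        · subst hjt
          have hset := getD_set_self r j (Int.ofNat i) (-1) (hlen j (by simp))
          rw [if_pos (List.mem_cons_self : j ∈ j :: P)]
          by_cases hjP : j ∈ P
          · rw [if_pos hjP]
          · rw [if_neg hjP, hset]
        · have hset := getD_set_ne r t j (Int.ofNat i) (-1) (fun hh => hjt hh.symm)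
          by_cases hjP : j ∈ P
          · rw [if_pos hjP, if_pos (List.mem_cons_of_mem _ hjP)]
          · rw [if_neg hjP, if_neg (by simp [List.mem_cons, hjt, hjP]), hset]
    · have hre : popLoop nums v i (t :: rest) r = (t :: rest, r) := by
        show (if nums.getD t 0 < v then popLoop nums v i rest (r.set t (Int.ofNat i)) else (t :: rest, r)) = _
        rw [if_neg h]
      refine ⟨[], by simp [hre], by simp, ?_, by simp [hre], by simp [hre]⟩
      rw [hre]
      intro u hu
      rcases List.mem_cons.mp hu with rfl | hu
      · exact not_lt.mp h
      · exact le_trans (not_lt.mp h) ((List.pairwise_cons.mp hpw).1 u hu)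

theorem step_inv (lt : Nat → Nat → Prop) (asym : ∀ a b, lt a b → ¬ lt b a)
    (nums : List Int) (done st : List Nat) (r : List Int) (i : Nat)
    (hInv : StInv lt nums done st r) (hi : i < nums.length) (hnd : i ∉ done)
    (hlt : ∀ j ∈ done, lt j i) :
    StInv lt nums (done ++ [i])
      (i :: (popLoop nums (nums.getD i 0) i st r).1)
      (popLoop nums (nums.getD i 0) i st r).2 := by
  obtain ⟨h1, h2, h3, h4, h5, h6, h7⟩ := hInv
  have hlenst : ∀ t ∈ st, t < r.length := fun t ht => h6 ▸ h1 t (h2 t ht)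
  obtain ⟨P, hsplit, hPlt, hge, hlen, hget⟩ :=
    popLoop_spec nums (nums.getD i 0) i st r h4 hlenst
  set p := popLoop nums (nums.getD i 0) i st r with hp
  have hPsub : ∀ t ∈ P, t ∈ st := fun t ht => hsplit ▸ List.mem_append_left _ ht
  have hRsub : ∀ t ∈ p.1, t ∈ st := fun t ht => hsplit ▸ List.mem_append_right _ ht
  refine ⟨?_, ?_, ?_, ?_, ?_, ?_, ?_⟩
  · intro j hj
    rcases List.mem_append.mp hj with hj | hj
    · exact h1 j hj
    · simp at hj; omega
  · intro j hj
    rcases List.mem_cons.mp hj with rfl | hj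
    · exact List.mem_append_right _ (by simp)
    · exact List.mem_append_left _ (h2 j (hRsub j hj))
  · refine List.pairwise_cons.mpr ⟨fun b hb => hlt b (h2 b (hRsub b hb)), ?_⟩
    exact (List.pairwise_append.mp (hsplit ▸ h3)).2.1
  · refine List.pairwise_cons.mpr ⟨fun b hb => hge b hb, ?_⟩
    exact (List.pairwise_append.mp (hsplit ▸ h4)).2.1
  · intro j hj
    rcases List.mem_append.mp hj with hjd | hji
    · have hjne : j ≠ i := fun hh => hnd (hh ▸ hjd)
      constructor
      · intro hjst m hm hltjm
        have hjp : j ∈ p.1 := by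
          rcases List.mem_cons.mp hjst with hh | hh
          · exact absurd hh hjne
          · exact hh
        rcases List.mem_append.mp hm with hmd | hmi
        · exact (h5 j hjd).mp (hRsub j hjp) m hmd hltjm
        · simp at hmi; subst hmi
          exact not_lt.mpr (hge j hjp)
      · intro hcond
        have hjst : j ∈ st :=
          (h5 j hjd).mpr (fun m hm hl => hcond m (List.mem_append_left _ hm) hl)
        rcases List.mem_append.mp (hsplit ▸ hjst) with hjP | hjp
        · exact absurd (hPlt j hjP)
            (hcond i (List.mem_append_right _ (by simp)) (hlt j hjd))
        · exact List.mem_cons_of_mem _ hjp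
    · simp at hji; subst hji
      constructor
      · intro _ m hm hltim
        rcases List.mem_append.mp hm with hmd | hmi
        · exact absurd hltim (asym _ _ (hlt m hmd))
        · simp at hmi; subst hmi
          exact absurd hltim (fun hh => asym _ _ hh hh)
      · intro _; exact List.mem_cons_self
  · rw [hlen]; exact h6
  · intro j
    rw [hget j]
    by_cases hjP : j ∈ P
    · simp only [hjP, if_pos]
      constructor
      · intro _
        refine ⟨List.mem_append_left _ (h2 j (hPsub j hjP)), i,
          List.mem_append_right _ (by simp), hlt j (h2 j (hPsub j hjP)), hPlt j hjP⟩
      · intro _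
        have : (0:Int) ≤ Int.ofNat i := Int.natCast_nonneg i
        omega
    · simp only [hjP, if_neg, not_false_iff]
      rw [h7 j]
      constructor
      · rintro ⟨hjd, m, hmd, hl, hlt'⟩
        exact ⟨List.mem_append_left _ hjd, m, List.mem_append_left _ hmd, hl, hlt'⟩
      · rintro ⟨hjd', m, hm', hlm, hnum⟩
        have hjd : j ∈ done := by
          rcases List.mem_append.mp hjd' with hh | hh
          · exact hh
          · simp at hh; subst hh
            exfalso
            rcases List.mem_append.mp hm' with hmd | hmi
            · exact asym _ _ (hlt m hmd) hlm
            · simp at hmi; subst hmi; exact asym _ _ hlm hlm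
        rcases List.mem_append.mp hm' with hmd | hmi
        · exact ⟨hjd, m, hmd, hlm, hnum⟩
        · simp at hmi; subst hmi
          have hjnst : j ∉ st := by
            intro hjst
            rcases List.mem_append.mp (hsplit ▸ hjst) with hh | hh
            · exact hjP hh
            · exact absurd hnum (not_lt.mpr (hge j hh))
          have hncond := mt (h5 j hjd).mpr hjnst
          push Not at hncond
          obtain ⟨m', hm'd, hlm', hnum'⟩ := hncond
          exact ⟨hjd, m', hm'd, hlm', hnum'⟩
      
theorem foldl_count (p : Nat → Prop) [DecidablePred p] :
    ∀ (l : List Nat) (c : Int),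
    l.foldl (fun res i => if p i then res + 1 else res) c
      = c + Int.ofNat (l.countP fun i => decide (p i)) := by
  intro l
  induction l with
  | nil => simp
  | cons a l ih =>
    intro c
    simp only [List.foldl_cons, List.countP_cons, ih]
    by_cases h : p a <;> simp [h] <;> omega

theorem pass_inv (lt : Nat → Nat → Prop) (asym : ∀ a b, lt a b → ¬ lt b a) (nums : List Int) :
    ∀ (rest done st : List Nat) (r : List Int),
    StInv lt nums done st r →
    (∀ m ∈ rest, m < nums.length) →
    (∀ j ∈ done, ∀ m ∈ rest, lt j m) →
    List.Pairwise lt rest →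
    (∀ m ∈ rest, m ∉ done) →
    StInv lt nums (done ++ rest)
      (rest.foldl (fun s i =>
        let p := popLoop nums (nums.getD i 0) i s.1 s.2
        (i :: p.1, p.2)) (st, r)).1
      (rest.foldl (fun s i =>
        let p := popLoop nums (nums.getD i 0) i s.1 s.2
        (i :: p.1, p.2)) (st, r)).2 := by
  intro rest
  induction rest with
  | nil => intro done st r hInv _ _ _ _; simpa using hInv
  | cons i rest' ih =>
    intro done st r hInv hb hltdr hpw hnd
    have hstep := step_inv lt asym nums done st r i hInv
      (hb i List.mem_cons_self) (hnd i List.mem_cons_self)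
      (fun j hj => hltdr j hj i List.mem_cons_self)
    have hres := ih (done ++ [i])
      (i :: (popLoop nums (nums.getD i 0) i st r).1)
      (popLoop nums (nums.getD i 0) i st r).2 hstep
      (fun m hm => hb m (List.mem_cons_of_mem _ hm))
      (fun j hj m hm => by
        rcases List.mem_append.mp hj with hj | hj
        · exact hltdr j hj m (List.mem_cons_of_mem _ hm)
        · simp at hj; subst hj; exact (List.pairwise_cons.mp hpw).1 m hm)
      hpw.of_cons
      (fun m hm hmem => by
        rcases List.mem_append.mp hmem with hh | hh
        · exact hnd m (List.mem_cons_of_mem _ hm) hh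
        · simp at hh; subst hh
          exact asym _ _ ((List.pairwise_cons.mp hpw).1 m hm) ((List.pairwise_cons.mp hpw).1 m hm))
    simpa [List.foldl_cons, List.append_assoc] using hres

theorem stackPass_ne (lt : Nat → Nat → Prop) (asym : ∀ a b, lt a b → ¬ lt b a)
    (nums : List Int) (order : List Nat)
    (hb : ∀ m ∈ order, m < nums.length) (hpw : List.Pairwise lt order) :
    ∀ j : Nat, (stackPass nums order).getD j (-1) ≠ -1 ↔
      (j ∈ order ∧ ∃ m ∈ order, lt j m ∧ nums.getD j 0 < nums.getD m 0) := by
  have h0 : StInv lt nums [] [] (List.replicate nums.length (-1)) := by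
    refine ⟨by simp, by simp, by simp, by simp, by simp, by simp, ?_⟩
    intro j
    simp
  have hres := pass_inv lt asym nums order [] [] (List.replicate nums.length (-1)) h0 hb
    (by simp) hpw (by simp)
  intro j
  have := hres.2.2.2.2.2.2 j
  simpa [stackPass] using this

theorem A_eq_key (nums : List Int) : bowlSubarrays nums = Int.ofNat (keyCount nums) := by
  have hR := stackPass_ne (fun a b => a < b) (fun a b h => by omega) nums
    (List.range nums.length) (by simp) List.pairwise_lt_range
  have hL := stackPass_ne (fun a b => b < a) (fun a b h => by omega) nums
    (List.range nums.length).reverse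
    (by intro m hm; rw [List.mem_reverse] at hm; simpa using hm)
    (List.pairwise_reverse.mpr List.pairwise_lt_range)
  show (List.range nums.length).foldl _ 0 = _
  rw [foldl_count (fun i => (stackPass nums (List.range nums.length).reverse).getD i (-1) ≠ -1 ∧
        (stackPass nums (List.range nums.length)).getD i (-1) ≠ -1)]
  rw [keyCount]
  rw [List.countP_congr ?_]
  · exact (zero_add _)
  intro j hj
  rw [List.mem_range] at hj
  simp only [decide_eq_true_eq]
  constructor
  · rintro ⟨hl, hr⟩
    obtain ⟨-, m, hmm, hlt, hnum⟩ := (hL j).mp hl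
    obtain ⟨-, m', hmm', hlt', hnum'⟩ := (hR j).mp hr
    have h1 : hasLb nums j = true := by
      rw [hasLb, List.any_eq_true]
      exact ⟨m, by rw [List.mem_range]; exact hlt, by simpa using hnum⟩
    have h2 : hasRb nums j = true := by
      rw [hasRb, List.any_eq_true]
      rw [List.mem_range] at hmm'
      exact ⟨m', by rw [List.mem_range]; exact hmm',
        by simp only [Bool.and_eq_true, decide_eq_true_eq]; exact ⟨hlt', hnum'⟩⟩
    simp [h1, h2]
  · intro hb
    rw [Bool.and_eq_true] at hb
    obtain ⟨h1, h2⟩ := hb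
    rw [hasLb, List.any_eq_true] at h1
    rw [hasRb, List.any_eq_true] at h2
    obtain ⟨m, hm, hd⟩ := h1
    rw [List.mem_range] at hm
    obtain ⟨m', hm', hd'⟩ := h2
    rw [List.mem_range] at hm'
    rw [Bool.and_eq_true, decide_eq_true_eq, decide_eq_true_eq] at hd'
    constructor
    · exact (hL j).mpr ⟨by simp [List.mem_range]; omega, m,
        by simp [List.mem_range]; omega, hm, by simpa using hd⟩
    · exact (hR j).mpr ⟨by simp [List.mem_range]; omega, m',
        by simp [List.mem_range]; omega, hd'.1, hd'.2⟩

def runMax (m : Option Int) (xs : List Int) : Option Int := xs.foldl bump m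

def hlist (m : Option Int) : List Int → List Bool
  | [] => []
  | v :: rest => gtb m v :: hlist (bump m v) rest

theorem fwd_eq : ∀ (xs : List Int) (acc : List Bool) (m : Option Int),
    xs.foldl (fun (s : List Bool × Option Int) v => (s.1 ++ [gtb s.2 v], bump s.2 v)) (acc, m)
      = (acc ++ hlist m xs, runMax m xs) := by
  intro xs
  induction xs with
  | nil => intro acc m; simp [hlist, runMax]
  | cons v rest ih =>
    intro acc m
    simp only [List.foldl_cons]
    rw [ih]
    simp [hlist, runMax, List.append_assoc]

theorem hlist_getD : ∀ (xs : List Int) (m : Option Int) (j : Nat), j < xs.length →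
    (hlist m xs).getD j false = gtb (runMax m (xs.take j)) (xs.getD j 0) := by
  intro xs
  induction xs with
  | nil => intro m j h; simp at h
  | cons v rest ih =>
    intro m j h
    cases j with
    | zero => simp [hlist, runMax]
    | succ j =>
      have := ih (bump m v) j (by simpa using h)
      simpa [hlist, runMax] using this

theorem gtb_bump (m : Option Int) (y v : Int) :
    gtb (bump m y) v = (gtb m v || decide (v < y)) := by
  cases m with
  | none => simp [gtb, bump]
  | some x =>
    simp only [gtb, bump]
    split_ifs with h <;> by_cases h1 : v < x <;> by_cases h2 : v < y <;>
      simp [h1, h2] <;> omega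

theorem gtb_runMax : ∀ (xs : List Int) (m : Option Int) (v : Int),
    gtb (runMax m xs) v = (gtb m v || xs.any fun y => decide (v < y)) := by
  intro xs
  induction xs with
  | nil => intro m v; simp [runMax]
  | cons y rest ih =>
    intro m v
    have h1 : runMax m (y :: rest) = runMax (bump m y) rest := by simp [runMax]
    rw [h1, ih, gtb_bump]
    simp [Bool.or_assoc]

theorem bump_comm (m : Option Int) (a b : Int) : bump (bump m a) b = bump (bump m b) a := by
  cases m with
  | none =>
    simp only [bump]
    split_ifs <;> first | rfl | (exfalso; omega) | (congr 1; omega)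
  | some x =>
    simp only [bump]
    split_ifs <;> simp only [bump] <;> split_ifs <;>
      first | rfl | (exfalso; omega) | (congr 1; omega)

theorem runMax_bump (xs : List Int) : ∀ (m : Option Int) (v : Int),
    bump (runMax m xs) v = runMax (bump m v) xs := by
  induction xs with
  | nil => intro m v; simp [runMax]
  | cons y rest ih =>
    intro m v
    have h1 : ∀ m', runMax m' (y :: rest) = runMax (bump m' y) rest := by
      intro m'; simp [runMax]
    rw [h1, h1, ih, bump_comm]

theorem bwd_count (nums : List Int) (hl : List Bool) :
    ∀ (n : Nat) (res : Int) (m : Option Int), n ≤ nums.length →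
    m = runMax none (nums.drop n) →
    (((List.range n).reverse).foldl (fun (s : Int × Option Int) i =>
        (if gtb s.2 (nums.getD i 0) && hl.getD i false then s.1 + 1 else s.1,
         bump s.2 (nums.getD i 0))) (res, m)).1
      = res + Int.ofNat ((List.range n).countP fun j =>
          ((nums.drop (j+1)).any fun y => decide (nums.getD j 0 < y)) && hl.getD j false) := by
  intro n
  induction n with
  | zero => intro res m _ _; simp
  | succ n ih =>
    intro res m hn hm
    have hnlt : n < nums.length := by omega
    have hrange : (List.range (n+1)).reverse = n :: (List.range n).reverse := by
      rw [List.range_succ]; simp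
    have hdrop : nums.drop n = nums.getD n 0 :: nums.drop (n+1) := by
      rw [List.drop_eq_getElem_cons hnlt, List.getD_eq_getElem?_getD,
        List.getElem?_eq_getElem hnlt]
      simp
    have hmv : bump m (nums.getD n 0) = runMax none (nums.drop n) := by
      rw [hm, runMax_bump, hdrop]
      have : ∀ m' v l, runMax m' (v :: l) = runMax (bump m' v) l := by
        intro m' v l; simp [runMax]
      rw [this]
    rw [hrange]
    simp only [List.foldl_cons]
    rw [ih _ _ (by omega) hmv]
    have hg : gtb m (nums.getD n 0) =
        ((nums.drop (n+1)).any fun y => decide (nums.getD n 0 < y)) := by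
      rw [hm, gtb_runMax]
      simp [gtb]
    rw [List.range_succ, List.countP_append, List.countP_cons, List.countP_nil]
    rw [hg]
    by_cases hcond : (((nums.drop (n+1)).any fun y => decide (nums.getD n 0 < y)) && hl.getD n false) = true
    · rw [if_pos hcond, if_pos hcond]; simp only [Int.ofNat_eq_natCast]; omega
    · rw [if_neg hcond, if_neg hcond]; simp only [Int.ofNat_eq_natCast]; omega

theorem any_take (xs : List Int) (j : Nat) (hj : j ≤ xs.length) (p : Int → Bool) :
    (xs.take j).any p = ((List.range j).any fun m => p (xs.getD m 0)) := by
  rw [Bool.eq_iff_iff, List.any_eq_true, List.any_eq_true]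
  constructor
  · rintro ⟨y, hy, hp⟩
    obtain ⟨k, hk, hke⟩ := List.mem_iff_getElem.mp hy
    rw [List.length_take] at hk
    refine ⟨k, by rw [List.mem_range]; omega, ?_⟩
    have : (List.take j xs)[k] = xs[k]'(by omega) := List.getElem_take
    rw [this] at hke
    rw [List.getD_eq_getElem?_getD, List.getElem?_eq_getElem (by omega : k < xs.length)]
    simpa [hke] using hp
  · rintro ⟨m, hm, hp⟩
    rw [List.mem_range] at hm
    have hmx : m < xs.length := by omega
    refine ⟨xs[m], ?_, ?_⟩
    · exact List.mem_iff_getElem.mpr ⟨m, by rw [List.length_take]; omega,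
        List.getElem_take⟩
    · rw [List.getD_eq_getElem?_getD, List.getElem?_eq_getElem hmx] at hp
      simpa using hp

theorem any_drop (xs : List Int) (j : Nat) (p : Int → Bool) :
    (xs.drop (j+1)).any p = ((List.range xs.length).any fun m => decide (j < m) && p (xs.getD m 0)) := by
  rw [Bool.eq_iff_iff, List.any_eq_true, List.any_eq_true]
  constructor
  · rintro ⟨y, hy, hp⟩
    obtain ⟨k, hk, hke⟩ := List.mem_iff_getElem.mp hy
    rw [List.length_drop] at hk
    have hkx : j + 1 + k < xs.length := by omega
    refine ⟨j + 1 + k, by rw [List.mem_range]; omega, ?_⟩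
    have : (List.drop (j+1) xs)[k] = xs[j+1+k]'hkx := List.getElem_drop
    rw [this] at hke
    rw [Bool.and_eq_true]
    refine ⟨by simp; omega, ?_⟩
    rw [List.getD_eq_getElem?_getD, List.getElem?_eq_getElem hkx]
    simpa [hke] using hp
  · rintro ⟨m, hm, hp⟩
    rw [List.mem_range] at hm
    rw [Bool.and_eq_true, decide_eq_true_eq] at hp
    obtain ⟨hjm, hp⟩ := hp
    refine ⟨xs[m], ?_, ?_⟩
    · refine List.mem_iff_getElem.mpr ⟨m - (j+1), by rw [List.length_drop]; omega, ?_⟩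
      have : (List.drop (j+1) xs)[m - (j+1)]'(by rw [List.length_drop]; omega)
          = xs[j+1+(m-(j+1))]'(by omega) := List.getElem_drop
      rw [this]
      congr 1
      omega
    · rw [List.getD_eq_getElem?_getD, List.getElem?_eq_getElem hm] at hp
      simpa using hp

theorem B_eq_key (nums : List Int) : bowlSubarrays_alt nums = Int.ofNat (keyCount nums) := by
  show (((List.range nums.length).reverse).foldl _ ((0 : Int), (none : Option Int))).1 = _
  rw [show (nums.foldl (fun (s : List Bool × Option Int) v =>
      (s.1 ++ [gtb s.2 v], bump s.2 v)) (([] : List Bool), (none : Option Int))).1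
      = hlist none nums by rw [fwd_eq]; simp]
  rw [bwd_count nums (hlist none nums) nums.length 0 none (le_refl _)
    (by rw [List.drop_length]; rfl)]
  rw [keyCount, List.countP_congr ?_]
  · exact (zero_add _)
  intro j hj
  rw [List.mem_range] at hj
  have hLeq : (hlist none nums).getD j false = hasLb nums j := by
    rw [hlist_getD nums none j hj, gtb_runMax, any_take nums j (by omega)]
    simp [gtb, hasLb]
  have hReq : ((nums.drop (j+1)).any fun y => decide (nums.getD j 0 < y)) = hasRb nums j := by
    rw [any_drop nums j]
    rfl
  rw [hLeq, hReq]
  rw [Bool.and_comm]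

-- ===== VERDICT (by name: the statement is the Claim_ definition above) =====
theorem bowlSubarrays_spec : Claim_equal_bowlSubarrays := by
  intro nums _
  unfold Spec_bowlSubarrays
  rw [A_eq_key, B_eq_key]
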